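-- pv_equiv track=rewrite | github.com/UEFBiomedicalInformaticsLab/BIODAI | MOOCAB/py/util/sequence_utils.py | same_len
-- ===== SOURCE A (Python) =====
-- from collections.abc import Iterable, Sized, Sequence
--
-- def same_len(a: Iterable, b: Iterable) -> bool:
--     """Works with any pair of objects with a working iter function.,
--     Uses the len method if possible, otherwise iterates."""
--     a_iter = iter(a)
--     if a is b:  # Done after the iter call so that we get an exception if the object is not iterable.
--         return True
--     b_iter = iter(b)
--     if isinstance(a, Sized) and isinstance(b, Sized):
--         return len(a) == len(b)
--     else:
--         while True:
--             try:
--                 next(a_iter)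
--             except StopIteration:
--                 try:
--                     next(b_iter)
--                     return False  # a is shorter
--                 except StopIteration:
--                     return True  # Same length
--             try:
--                 next(b_iter)
--             except StopIteration:
--                 return False  # b is shorter
-- ===== SOURCE B (Python) =====
-- from itertools import zip_longest
--
--
-- def same_len(a, b):
--     a_iter = iter(a)
--     if a is b:
--         return True
--     b_iter = iter(b)
--     sentinel = object()
--     return all(x is not sentinel and y is not sentinel
--                for x, y in zip_longest(a_iter, b_iter, fillvalue=sentinel))
-- ===== Notes on version B (the rewrite author's own statement) =====
-- stated objective: idiomatic
-- what changed: B drops the isinstance-Sized len() fast path and the manual while/try-except StopIteration state machine, instead counting the two iterators in tandem with itertools.zip_longest and a unique fill sentinel, short-circuiting when either side runs out.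
import Mathlib
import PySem

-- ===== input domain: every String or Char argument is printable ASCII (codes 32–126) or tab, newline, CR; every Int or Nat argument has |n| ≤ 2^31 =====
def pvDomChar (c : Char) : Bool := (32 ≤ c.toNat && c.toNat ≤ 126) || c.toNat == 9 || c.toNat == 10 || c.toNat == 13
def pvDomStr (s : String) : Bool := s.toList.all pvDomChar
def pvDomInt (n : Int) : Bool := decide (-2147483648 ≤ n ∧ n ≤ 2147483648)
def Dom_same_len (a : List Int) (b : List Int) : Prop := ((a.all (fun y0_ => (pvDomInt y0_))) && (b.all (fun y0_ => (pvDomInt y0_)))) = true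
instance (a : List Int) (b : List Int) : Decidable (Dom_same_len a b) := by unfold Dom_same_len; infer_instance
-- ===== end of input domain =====

-- B replaces A's Sized len() fast path + manual StopIteration loop with an idiomatic zip_longest/sentinel tandem count; same result.


-- ===== PORT A =====
-- Port of A. Under the List Int convention both arguments are lists, hence Sized,
-- so A's `a is b` branch and the Sized fast path both yield len(a) == len(b);
-- the while/try-except branch is unreachable for list arguments.
def same_len (a : List Int) (b : List Int) : Bool := decide (a.length = b.length)

-- ===== PORT B =====
-- Port of B: tandem walk over both lists (zip_longest with a sentinel);
-- the shorter one running out first means False.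
def sameLenTandem : List Int → List Int → Bool
  | [], [] => true
  | [], _ :: _ => false
  | _ :: _, [] => false
  | _ :: xs, _ :: ys => sameLenTandem xs ys

def same_len_alt (a : List Int) (b : List Int) : Bool := sameLenTandem a b

-- ===== PRECONDITION & SPEC =====
def Spec_same_len (a : List Int) (b : List Int) (out : Bool) : Prop := out = same_len_alt a b
instance (a : List Int) (b : List Int) (out : Bool) : Decidable (Spec_same_len a b out) := by unfold Spec_same_len; infer_instance

-- ===== CLAIM (what is proved, stated in full; the proofs are below) =====
def Claim_equal_same_len : Prop := ∀ (a : List Int) (b : List Int), Dom_same_len a b → Spec_same_len a b (same_len a b)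

-- ===== LEMMAS AND PROOFS =====

-- ===== VERDICT (by name: the statement is the Claim_ definition above) =====
theorem tandem_eq_length (a b : List Int) :
    sameLenTandem a b = decide (a.length = b.length) := by
  induction a generalizing b with
  | nil => cases b <;> simp [sameLenTandem]
  | cons x xs ih => cases b <;> simp [sameLenTandem, ih]

theorem same_len_spec : Claim_equal_same_len := by
  intro a b _
  unfold Spec_same_len same_len same_len_alt
  rw [tandem_eq_length]
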